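-- pv_equiv track=rewrite | github.com/yzc0000/Non-project-self-study-simple- | Algos/SPRT.py | srpt_preemptive
-- ===== SOURCE A (Python) =====
-- import heapq
--
-- def srpt_preemptive(release, proc, names=None):
--     n = len(proc)
--     if names is None:
--         names = [f"Job_{i}" for i in range(n)]
--     pending = []
--     for i in range(n):
--         heapq.heappush(pending, (release[i], i, proc[i], names[i]))
--
--     avail = []
--     C = [None] * n
--     t = 0
--
--     while avail or pending:
--         if not avail and pending and t < pending[0][0]:
--             t = pending[0][0]
--         while pending and pending[0][0] <= t:
--             r, i, p, nm = heapq.heappop(pending)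
--             heapq.heappush(avail, (p, i, nm))
--         if not avail:
--             continue
--         rem, i, nm = heapq.heappop(avail)
--         if pending:
--             next_r = pending[0][0]
--         else:
--             next_r = float("inf")
--
--         if t + rem <= next_r:
--             run = rem
--         else:
--             run = next_r - t
--         t += run
--         rem -= run
--         if rem > 0:
--             heapq.heappush(avail, (rem, i, nm))
--         else:
--             C[i] = t
--     return C, t
-- ===== SOURCE B (Python) =====
-- def srpt_preemptive(release, proc, names=None):
--     # Same event-driven simulation, but with plain lists and min-scans instead of heaps.
--     n = len(proc)
--     if names is None:
--         names = [f"Job_{i}" for i in range(n)]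
--     pending = [(release[i], i, proc[i], names[i]) for i in range(n)]
--     avail = []
--     C = [None] * n
--     t = 0
--     while avail or pending:
--         if not avail:
--             t = max(t, min(r for r, _, _, _ in pending))
--         avail += [(p, i, nm) for r, i, p, nm in pending if r <= t]
--         pending = [job for job in pending if job[0] > t]
--         rem, i, nm = min(avail, key=lambda e: (e[0], e[1]))
--         avail.remove((rem, i, nm))
--         next_r = min((r for r, _, _, _ in pending), default=None)
--         run = rem if (next_r is None or t + rem <= next_r) else next_r - t
--         t += run
--         rem -= run
--         if rem > 0:
--             avail.append((rem, i, nm))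
--         else:
--             C[i] = t
--     return C, t
-- ===== Notes on version B (the rewrite author's own statement) =====
-- stated objective: simpler
-- what changed: Both heapq priority queues are replaced by plain Python lists: the pending queue is split with list comprehensions on the release time and the next job is chosen by a linear min-scan with the same (rem, i) / release keys, keeping the identical event-driven control flow.
import Mathlib
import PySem

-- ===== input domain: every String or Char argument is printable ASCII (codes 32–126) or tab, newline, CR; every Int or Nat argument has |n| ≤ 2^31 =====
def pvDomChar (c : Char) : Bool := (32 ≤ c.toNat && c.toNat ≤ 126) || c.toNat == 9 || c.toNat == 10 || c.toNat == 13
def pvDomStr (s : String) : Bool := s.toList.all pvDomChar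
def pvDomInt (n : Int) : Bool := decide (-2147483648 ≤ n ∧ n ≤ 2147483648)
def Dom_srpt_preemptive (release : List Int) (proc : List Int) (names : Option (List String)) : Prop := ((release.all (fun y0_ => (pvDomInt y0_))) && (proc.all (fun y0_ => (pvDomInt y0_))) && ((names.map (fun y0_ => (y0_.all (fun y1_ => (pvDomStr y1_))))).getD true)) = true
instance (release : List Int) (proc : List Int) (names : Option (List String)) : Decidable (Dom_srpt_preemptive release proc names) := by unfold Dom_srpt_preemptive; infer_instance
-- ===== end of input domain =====

-- B replaces both heaps by plain lists with linear min-scans (same event-driven control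
-- flow, same tie-breaking keys); objective: simpler data structures, no heap machinery.

-- ===== PORT A =====
-- Jobs carry the exact tuples Python pushes: pending (release, i, proc, name), avail (rem, i, name).
-- The heaps compare tuples lexicographically; since the index i is distinct inside each heap,
-- a comparison never reaches the name, so the heap order is the lexicographic order on
-- (first, i).  heapq.heappush/heappop are ported as the priority queue they implement:
-- a list kept sorted by that key (push = ordered insert, pop = head): exact here because
-- keys inside each heap are pairwise distinct, so the popped minimum is unique.
def keyLt (a b : Int × Int) : Bool := decide (a.1 < b.1) || (a.1 == b.1 && decide (a.2 < b.2))

def pushBy {α : Type} (key : α → Int × Int) (e : α) : List α → List α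
  | [] => [e]
  | x :: xs => if keyLt (key e) (key x) then e :: x :: xs else x :: pushBy key e xs

def keyP (e : Int × Int × Int × String) : Int × Int := (e.1, e.2.1)
def keyA (e : Int × Int × String) : Int × Int := (e.1, e.2.1)
def toAv (e : Int × Int × Int × String) : Int × Int × String := (e.2.2.1, e.2.1, e.2.2.2)

-- the inner `while pending and pending[0][0] <= t` loop
def moveA (t : Int) : List (Int × Int × Int × String) → List (Int × Int × String) →
    List (Int × Int × Int × String) × List (Int × Int × String)
  | [], avail => ([], avail)
  | e :: rest, avail =>
      if e.1 ≤ t then moveA t rest (pushBy keyA (toAv e) avail) else (e :: rest, avail)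

-- `if not avail and pending and t < pending[0][0]: t = pending[0][0]`
def tAdv (t : Int) (avail : List (Int × Int × String)) (pend : List (Int × Int × Int × String)) : Int :=
  match avail, pend with
  | [], e :: _ => if t < e.1 then e.1 else t
  | _, _ => t

-- the outer while loop; fuel only makes the recursion total (3*n+2 steps always suffice)
def loopA : Nat → List (Int × Int × Int × String) → List (Int × Int × String) →
    List Int → Int → List Int × Int
  | 0, _, _, C, t => (C, t)
  | f + 1, pend, avail, C, t =>
      if pend.isEmpty && avail.isEmpty then (C, t)
      else
        let t1 := tAdv t avail pend
        let st := moveA t1 pend avail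
        match st.2 with
        | [] => loopA f st.1 [] C t1      -- the `continue` branch
        | a :: rest =>
            let run := match st.1 with
              | [] => a.1
              | e :: _ => if t1 + a.1 ≤ e.1 then a.1 else e.1 - t1
            let t2 := t1 + run
            let rem2 := a.1 - run
            if rem2 > 0 then loopA f st.1 (pushBy keyA (rem2, a.2.1, a.2.2) rest) C t2
            else loopA f st.1 rest (C.set a.2.1.toNat t2) t2

-- C is initialised with 0 in place of Python's None: every job completes before the loop
-- ends, so every slot is overwritten.  Indexing release[i]/proc[i]/names[i] is via getD:
-- exact on Pre_ (all indices in range; Python raises outside Pre_).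
def srpt_preemptive (release : List Int) (proc : List Int) (names : Option (List String)) : List Int × Int :=
  let n := proc.length
  let nms := match names with
    | none => (List.range n).map (fun i => "Job_" ++ PySem.Int.toStr (i : Int))
    | some l => l
  let pend0 := (List.range n).foldl
    (fun h i => pushBy keyP (release.getD i 0, (i : Int), proc.getD i 0, nms.getD i "") h) []
  loopA (3 * n + 2) pend0 [] (List.replicate n 0) 0

-- ===== PORT B =====
-- min over the release components (Source B: min(r for r,_,_,_ in ...); only called nonempty)
def minR : List (Int × Int × Int × String) → Int
  | [] => 0        -- unreachable: Source B never takes this min of an empty list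
  | e :: rest => rest.foldl (fun m x => min m x.1) e.1

-- Python min(avail, key=(e[0],e[1])): first element with minimal key
def minAv (a : Int × Int × String) (rest : List (Int × Int × String)) : Int × Int × String :=
  rest.foldl (fun b e => if keyLt (keyA e) (keyA b) then e else b) a

def loopB : Nat → List (Int × Int × Int × String) → List (Int × Int × String) →
    List Int → Int → List Int × Int
  | 0, _, _, C, t => (C, t)
  | f + 1, pend, avail, C, t =>
      if pend.isEmpty && avail.isEmpty then (C, t)
      else
        let t1 := if avail.isEmpty then max t (minR pend) else t
        let avail2 := avail ++ (pend.filter (fun e => decide (e.1 ≤ t1))).map toAv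
        let pend2 := pend.filter (fun e => decide (t1 < e.1))
        match avail2 with
        | [] => (C, t1)  -- unreachable when the loop is entered (see proof)
        | a :: rest =>
            let m := minAv a rest
            let avail3 := (a :: rest).erase m
            let run := match pend2 with
              | [] => m.1
              | _ :: _ => if t1 + m.1 ≤ minR pend2 then m.1 else minR pend2 - t1
            let t2 := t1 + run
            let rem2 := m.1 - run
            if rem2 > 0 then loopB f pend2 (avail3 ++ [(rem2, m.2.1, m.2.2)]) C t2
            else loopB f pend2 avail3 (C.set m.2.1.toNat t2) t2

def srpt_preemptive_alt (release : List Int) (proc : List Int) (names : Option (List String)) : List Int × Int :=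
  let n := proc.length
  let nms := match names with
    | none => (List.range n).map (fun i => "Job_" ++ PySem.Int.toStr (i : Int))
    | some l => l
  let pend0 := (List.range n).map
    (fun i => (release.getD i 0, (i : Int), proc.getD i 0, nms.getD i ""))
  loopB (3 * n + 2) pend0 [] (List.replicate n 0) 0

-- ===== PRECONDITION & SPEC =====
-- Pre_ excludes exactly the inputs where Python A raises IndexError: release (or an
-- explicit names list) shorter than proc.
def Pre_srpt_preemptive (release : List Int) (proc : List Int) (names : Option (List String)) : Prop :=
  proc.length ≤ release.length ∧ proc.length ≤ (names.map List.length).getD proc.length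
instance (release : List Int) (proc : List Int) (names : Option (List String)) : Decidable (Pre_srpt_preemptive release proc names) := by unfold Pre_srpt_preemptive; infer_instance

def pvWitness_srpt_preemptive : List Int × List Int × Option (List String) := ([0, 2], [3, 1], none)

def Spec_srpt_preemptive (release : List Int) (proc : List Int) (names : Option (List String)) (out : List Int × Int) : Prop := out = srpt_preemptive_alt release proc names
instance (release : List Int) (proc : List Int) (names : Option (List String)) (out : List Int × Int) : Decidable (Spec_srpt_preemptive release proc names out) := by unfold Spec_srpt_preemptive; infer_instance

-- ===== CLAIM (what is proved, stated in full; the proofs are below) =====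
def Claim_equal_srpt_preemptive : Prop := ∀ (release : List Int) (proc : List Int) (names : Option (List String)), Dom_srpt_preemptive release proc names → Pre_srpt_preemptive release proc names → Spec_srpt_preemptive release proc names (srpt_preemptive release proc names)

-- ===== LEMMAS AND PROOFS =====

-- the non-strict key order used in the invariants
def keyLe (a b : Int × Int) : Prop := a.1 < b.1 ∨ (a.1 = b.1 ∧ a.2 ≤ b.2)

theorem keyLt_iff (a b : Int × Int) : keyLt a b = true ↔ (a.1 < b.1 ∨ (a.1 = b.1 ∧ a.2 < b.2)) := by
  simp [keyLt]

theorem keyLe_total (a b : Int × Int) : keyLt a b = false → keyLe b a := by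
  rw [← Bool.not_eq_true, keyLt_iff]; unfold keyLe; omega

theorem keyLe_antisymm (a b : Int × Int) : keyLe a b → keyLe b a → a = b := by
  unfold keyLe; intro h1 h2; ext <;> omega

theorem keyLe_trans (a b c : Int × Int) : keyLe a b → keyLe b c → keyLe a c := by
  unfold keyLe; omega

def sortedBy {α : Type} (key : α → Int × Int) (l : List α) : Prop :=
  l.Pairwise (fun x y => keyLe (key x) (key y))

theorem pushBy_perm {α : Type} (key : α → Int × Int) (e : α) (l : List α) :
    (pushBy key e l).Perm (e :: l) := by
  induction l with
  | nil => simp [pushBy]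
  | cons x xs ih =>
      simp only [pushBy]
      split
      · exact List.Perm.refl _
      · exact (ih.cons x).trans (List.Perm.swap e x xs)

theorem pushBy_sorted {α : Type} (key : α → Int × Int) (e : α) (l : List α)
    (h : sortedBy key l) : sortedBy key (pushBy key e l) := by
  induction l with
  | nil => simp [pushBy, sortedBy]
  | cons x xs ih =>
      rcases List.pairwise_cons.mp h with ⟨hx, hxs⟩
      simp only [pushBy]
      split
      · rename_i hlt
        refine List.pairwise_cons.mpr ⟨?_, h⟩
        intro y hy
        rcases List.mem_cons.mp hy with hy | hy
        · subst hy; rw [keyLt_iff] at hlt; unfold keyLe; omega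
        · exact keyLe_trans _ _ _ (by rw [keyLt_iff] at hlt; unfold keyLe; omega) (hx y hy)
      · rename_i hnlt
        refine List.pairwise_cons.mpr ⟨?_, ih hxs⟩
        intro y hy
        have := (pushBy_perm key e xs).mem_iff.mp hy
        rcases List.mem_cons.mp this with hy' | hy'
        · subst hy'; exact keyLe_total _ _ (by simpa using hnlt)
        · exact hx y hy'

theorem foldl_min_spec (xs : List (Int × Int × Int × String)) : ∀ (m : Int),
    (xs.foldl (fun m x => min m x.1) m = m ∨ ∃ x ∈ xs, xs.foldl (fun m x => min m x.1) m = x.1) ∧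
      xs.foldl (fun m x => min m x.1) m ≤ m ∧ ∀ x ∈ xs, xs.foldl (fun m x => min m x.1) m ≤ x.1 := by
  induction xs with
  | nil => simp
  | cons y ys ih =>
      intro m
      rcases ih (min m y.1) with ⟨h1, h2, h3⟩
      refine ⟨?_, ?_, ?_⟩
      · rcases h1 with h | ⟨x, hx, he⟩
        · rcases le_or_gt m y.1 with hc | hc
          · left; simp only [List.foldl_cons, h]; omega
          · right; exact ⟨y, List.mem_cons_self, by simp only [List.foldl_cons, h]; omega⟩
        · right; exact ⟨x, List.mem_cons_of_mem _ hx, he⟩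
      · simp only [List.foldl_cons]; omega
      · intro x hx
        rcases List.mem_cons.mp hx with hx | hx
        · subst hx; simp only [List.foldl_cons]; omega
        · exact h3 x hx

theorem minR_spec (e : Int × Int × Int × String) (rest : List (Int × Int × Int × String)) :
    (minR (e :: rest) = e.1 ∨ ∃ x ∈ rest, minR (e :: rest) = x.1) ∧
      (minR (e :: rest) ≤ e.1 ∧ ∀ x ∈ rest, minR (e :: rest) ≤ x.1) := by
  have h := foldl_min_spec rest e.1
  simpa [minR] using h

theorem keyLe_refl (a : Int × Int) : keyLe a a := by unfold keyLe; omega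

theorem keyLt_keyLe (a b : Int × Int) : keyLt a b = true → keyLe a b := by
  rw [keyLt_iff]; unfold keyLe; omega

theorem minAv_spec (a : Int × Int × String) (rest : List (Int × Int × String)) :
    (minAv a rest = a ∨ minAv a rest ∈ rest) ∧
      (keyLe (keyA (minAv a rest)) (keyA a) ∧ ∀ x ∈ rest, keyLe (keyA (minAv a rest)) (keyA x)) := by
  unfold minAv
  induction rest generalizing a with
  | nil => exact ⟨Or.inl rfl, keyLe_refl _, by simp⟩
  | cons y ys ih =>
      simp only [List.foldl_cons]
      set a' := if keyLt (keyA y) (keyA a) then y else a with ha'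
      rcases ih a' with ⟨h1, h2, h3⟩
      have hle_a : keyLe (keyA a') (keyA a) := by
        rw [ha']; split
        · rename_i hlt; exact keyLt_keyLe _ _ hlt
        · exact keyLe_refl _
      have hle_y : keyLe (keyA a') (keyA y) := by
        rw [ha']; split
        · exact keyLe_refl _
        · rename_i hnlt; exact keyLe_total _ _ (Bool.not_eq_true _ ▸ eq_false_of_ne_true hnlt)
      refine ⟨?_, keyLe_trans _ _ _ h2 hle_a, ?_⟩
      · rcases h1 with h | h
        · rw [h, ha']; split
          · exact Or.inr List.mem_cons_self
          · exact Or.inl rfl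
        · exact Or.inr (List.mem_cons_of_mem _ h)
      · intro x hx
        rcases List.mem_cons.mp hx with hx | hx
        · subst hx; exact keyLe_trans _ _ _ h2 hle_y
        · exact h3 x hx

theorem moveA_spec (t : Int) (pA : List (Int × Int × Int × String)) :
    ∀ (aA : List (Int × Int × String)), sortedBy keyP pA → sortedBy keyA aA →
    (moveA t pA aA).1 = pA.filter (fun e => decide (t < e.1)) ∧
      (moveA t pA aA).2.Perm (aA ++ (pA.filter (fun e => decide (e.1 ≤ t))).map toAv) ∧
      sortedBy keyA (moveA t pA aA).2 := by
  induction pA with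
  | nil => intro aA _ ha; simpa [moveA] using ha
  | cons e rest ih =>
      intro aA hp ha
      rcases List.pairwise_cons.mp hp with ⟨he, hrest⟩
      by_cases hle : e.1 ≤ t
      · have hstep : moveA t (e :: rest) aA = moveA t rest (pushBy keyA (toAv e) aA) := by
          simp [moveA, hle]
        rcases ih (pushBy keyA (toAv e) aA) hrest (pushBy_sorted _ _ _ ha) with ⟨h1, h2, h3⟩
        refine ⟨?_, ?_, hstep ▸ h3⟩
        · rw [hstep, h1, List.filter_cons]
          simp [show ¬ t < e.1 by omega]
        · rw [hstep, List.filter_cons]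
          simp only [hle, decide_true, if_pos, List.map_cons]
          refine h2.trans ?_
          refine (List.Perm.append_right _ (pushBy_perm keyA (toAv e) aA)).trans ?_
          exact (List.perm_middle).symm
      · have hstep : moveA t (e :: rest) aA = (e :: rest, aA) := by
          simp [moveA, hle]
        rw [hstep]
        refine ⟨?_, ?_, ha⟩
        · refine (List.filter_eq_self.mpr ?_).symm
          intro a hamem
          rcases List.mem_cons.mp hamem with h | h
          · subst h; simp; omega
          · have := he a h
            unfold keyLe keyP at this
            simp; omega
        · have : (e :: rest).filter (fun e => decide (e.1 ≤ t)) = [] := by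
            refine List.filter_eq_nil_iff.mpr ?_
            intro a hamem
            rcases List.mem_cons.mp hamem with h | h
            · subst h; simp; omega
            · have := he a h
              unfold keyLe keyP at this
              simp; omega
          simp [this]

theorem minR_eq_head (e : Int × Int × Int × String) (rest pB : List (Int × Int × Int × String))
    (hs : sortedBy keyP (e :: rest)) (hperm : (e :: rest).Perm pB) : minR pB = e.1 := by
  have hhead : ∀ x ∈ e :: rest, e.1 ≤ x.1 := by
    intro x hx
    rcases List.mem_cons.mp hx with hx | hx
    · subst hx; omega
    · have := (List.pairwise_cons.mp hs).1 x hx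
      unfold keyLe keyP at this; omega
  cases pB with
  | nil => have := hperm.length_eq; simp at this
  | cons b bs =>
      rcases minR_spec b bs with ⟨hmem, hle_b, hle⟩
      have h1 : minR (b :: bs) ≤ e.1 := by
        have he : e ∈ b :: bs := hperm.subset List.mem_cons_self
        rcases List.mem_cons.mp he with h | h
        · rw [h]; exact hle_b
        · exact hle e h
      have h2 : e.1 ≤ minR (b :: bs) := by
        rcases hmem with h | ⟨x, hx, h⟩
        · rw [h]; exact hhead b (hperm.symm.subset List.mem_cons_self)
        · rw [h]; exact hhead x (hperm.symm.subset (List.mem_cons_of_mem _ hx))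
      omega

theorem sel_head (a : Int × Int × String) (rest : List (Int × Int × String))
    (b : Int × Int × String) (bs : List (Int × Int × String))
    (hs : sortedBy keyA (a :: rest)) (hperm : (b :: bs).Perm (a :: rest))
    (hnd : ((b :: bs).map (fun e => e.2.1)).Nodup) : minAv b bs = a := by
  rcases minAv_spec b bs with ⟨hmem, hle_b, hle⟩
  have hmem' : minAv b bs ∈ b :: bs := by
    rcases hmem with h | h
    · rw [h]; exact List.mem_cons_self
    · exact List.mem_cons_of_mem _ h
  have hleAll : ∀ x ∈ b :: bs, keyLe (keyA (minAv b bs)) (keyA x) := by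
    intro x hx
    rcases List.mem_cons.mp hx with hx | hx
    · subst hx; exact hle_b
    · exact hle x hx
  have h1 : keyLe (keyA (minAv b bs)) (keyA a) :=
    hleAll a (hperm.symm.subset List.mem_cons_self)
  have h2 : keyLe (keyA a) (keyA (minAv b bs)) := by
    rcases List.mem_cons.mp (hperm.subset hmem') with h | h
    · rw [h]; exact keyLe_refl _
    · exact (List.pairwise_cons.mp hs).1 _ h
  have hkey : keyA (minAv b bs) = keyA a := keyLe_antisymm _ _ h1 h2
  have hi : (minAv b bs).2.1 = a.2.1 := by
    unfold keyA at hkey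
    exact congrArg Prod.snd hkey
  exact List.inj_on_of_nodup_map hnd hmem' (hperm.symm.subset List.mem_cons_self) hi

theorem filter_le_eq_not_lt (t1 : Int) (l : List (Int × Int × Int × String)) :
    l.filter (fun e => decide (e.1 ≤ t1)) = l.filter (fun e => ! decide (t1 < e.1)) := by
  apply List.filter_congr
  intro x _
  by_cases h : x.1 ≤ t1
  · simp [h, show ¬ t1 < x.1 from by omega]
  · simp [h, show t1 < x.1 from by omega]

theorem split_perm (t1 : Int) (l : List (Int × Int × Int × String)) :
    (l.filter (fun e => decide (t1 < e.1)) ++ l.filter (fun e => decide (e.1 ≤ t1))).Perm l := by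
  rw [filter_le_eq_not_lt]
  exact List.filter_append_perm _ l

def SimInv (pA : List (Int × Int × Int × String)) (aA : List (Int × Int × String))
    (pB : List (Int × Int × Int × String)) (aB : List (Int × Int × String)) : Prop :=
  pA.Perm pB ∧ aA.Perm aB ∧ sortedBy keyP pA ∧ sortedBy keyA aA ∧
    (pB.map (fun e => e.2.1) ++ aB.map (fun e => e.2.1)).Nodup

theorem final_step (f : Nat)
    (ih : ∀ (pA : List (Int × Int × Int × String)) (aA : List (Int × Int × String))
      (pB : List (Int × Int × Int × String)) (aB : List (Int × Int × String)) (C : List Int) (t : Int),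
      SimInv pA aA pB aB → loopA f pA aA C t = loopB f pB aB C t)
    (p2 pend2B : List (Int × Int × Int × String))
    (a : Int × Int × String) (rest : List (Int × Int × String))
    (b : Int × Int × String) (bs : List (Int × Int × String))
    (C : List Int) (t1 run : Int)
    (hfperm : p2.Perm pend2B) (hfsort : sortedBy keyP p2)
    (hm3 : sortedBy keyA (a :: rest)) (havail : (b :: bs).Perm (a :: rest))
    (hndm : (pend2B.map (fun e => e.2.1) ++ (b :: bs).map (fun e => e.2.1)).Nodup) :
    (if a.1 - run > 0 then
        loopA f p2 (pushBy keyA (a.1 - run, a.2.1, a.2.2) rest) C (t1 + run)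
      else loopA f p2 rest (C.set a.2.1.toNat (t1 + run)) (t1 + run))
    = (if a.1 - run > 0 then
        loopB f pend2B ((b :: bs).erase a ++ [(a.1 - run, a.2.1, a.2.2)]) C (t1 + run)
      else loopB f pend2B ((b :: bs).erase a) (C.set a.2.1.toNat (t1 + run)) (t1 + run)) := by
  have hamem : a ∈ b :: bs := havail.symm.subset List.mem_cons_self
  have hrest : ((b :: bs).erase a).Perm rest := by
    have h := havail.erase a
    rwa [List.erase_cons_head] at h
  by_cases hrem : a.1 - run > 0
  · rw [if_pos hrem, if_pos hrem]
    apply ih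
    refine ⟨hfperm, ?_, hfsort, ?_, ?_⟩
    · refine (pushBy_perm _ _ _).trans ?_
      refine (hrest.symm.cons _).trans ?_
      exact (List.perm_append_singleton _ _).symm
    · exact pushBy_sorted _ _ _ (List.pairwise_cons.mp hm3).2
    · refine List.Perm.nodup ?_ hndm
      refine (List.Perm.append_left _ ?_).symm
      have h1 : (((b :: bs).erase a) ++ [(a.1 - run, a.2.1, a.2.2)]).map (fun e => e.2.1)
          = ((b :: bs).erase a).map (fun e => e.2.1) ++ [a.2.1] := by
        rw [List.map_append]; rfl
      rw [h1]
      have h2 : ((b :: bs).map (fun e => e.2.1)).Perm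
          (a.2.1 :: ((b :: bs).erase a).map (fun e => e.2.1)) := by
        have h3 := (List.perm_cons_erase hamem).map (fun e : Int × Int × String => e.2.1)
        simpa using h3
      exact (List.perm_append_singleton _ _).trans h2.symm
  · rw [if_neg hrem, if_neg hrem]
    apply ih
    refine ⟨hfperm, hrest.symm, hfsort, (List.pairwise_cons.mp hm3).2, ?_⟩
    refine List.Nodup.sublist ?_ hndm
    exact List.Sublist.append_left ((List.erase_sublist).map _) _

theorem loop_eq (f : Nat) : ∀ (pA : List (Int × Int × Int × String)) (aA : List (Int × Int × String))
    (pB : List (Int × Int × Int × String)) (aB : List (Int × Int × String)) (C : List Int) (t : Int),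
    SimInv pA aA pB aB → loopA f pA aA C t = loopB f pB aB C t := by
  induction f with
  | zero => intro pA aA pB aB C t _; rfl
  | succ f ih =>
      intro pA aA pB aB C t hInv
      obtain ⟨hpp, hap, hps, has, hnd⟩ := hInv
      have hpnil : pA = [] ↔ pB = [] := by
        constructor
        · intro h; subst h; exact List.perm_nil.mp hpp.symm
        · intro h; subst h; exact List.perm_nil.mp hpp
      have hanil : aA = [] ↔ aB = [] := by
        constructor
        · intro h; subst h; exact List.perm_nil.mp hap.symm
        · intro h; subst h; exact List.perm_nil.mp hap
      by_cases hboth : pA = [] ∧ aA = []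
      · obtain ⟨h1, h2⟩ := hboth
        have hb1 : pB = [] := hpnil.mp h1
        have hb2 : aB = [] := hanil.mp h2
        subst h1; subst h2; subst hb1; subst hb2
        rfl
      · have hcondA : (pA.isEmpty && aA.isEmpty) = false := by
          by_contra hcon
          have h' : (pA.isEmpty && aA.isEmpty) = true := by
            revert hcon; cases (pA.isEmpty && aA.isEmpty) <;> simp
          simp only [Bool.and_eq_true, List.isEmpty_iff] at h'
          exact hboth h'
        have hcondB : (pB.isEmpty && aB.isEmpty) = false := by
          by_contra hcon
          have h' : (pB.isEmpty && aB.isEmpty) = true := by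
            revert hcon; cases (pB.isEmpty && aB.isEmpty) <;> simp
          simp only [Bool.and_eq_true, List.isEmpty_iff] at h'
          exact hboth ⟨hpnil.mpr h'.1, hanil.mpr h'.2⟩
        have ht1eq : (if aB.isEmpty then max t (minR pB) else t) = tAdv t aA pA := by
          cases aA with
          | nil =>
              have haB : aB = [] := hanil.mp rfl
              cases pA with
              | nil => exact absurd ⟨rfl, rfl⟩ hboth
              | cons e pr =>
                  have hmr : minR pB = e.1 := minR_eq_head e pr pB hps hpp
                  simp only [haB, List.isEmpty_nil, if_true, hmr, tAdv]
                  omega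
          | cons a0 as0 =>
              have haB : aB ≠ [] := fun h => absurd (hanil.mpr h) (List.cons_ne_nil a0 as0)
              simp [List.isEmpty_iff, haB, tAdv]
        have hready : aA = [] → ∃ e pr, pA = e :: pr ∧ e.1 ≤ tAdv t aA pA := by
          intro h; subst h
          cases pA with
          | nil => exact absurd ⟨rfl, rfl⟩ hboth
          | cons e pr => exact ⟨e, pr, rfl, by simp [tAdv]; omega⟩
        simp only [loopA, loopB, hcondA, hcondB, Bool.false_eq_true, if_false, ht1eq]
        generalize hgen : tAdv t aA pA = t1 at hready ⊢
        rcases hmv : moveA t1 pA aA with ⟨p2, a2⟩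
        obtain ⟨hm1, hm2, hm3⟩ := moveA_spec t1 pA aA hps has
        rw [hmv] at hm1 hm2 hm3
        simp only at hm1 hm2 hm3
        have hfperm : p2.Perm (pB.filter (fun e => decide (t1 < e.1))) := by
          rw [hm1]; exact hpp.filter _
        have hfsort : sortedBy keyP p2 := by
          rw [hm1]; exact hps.filter _
        have havperm : (aB ++ (pB.filter (fun e => decide (e.1 ≤ t1))).map toAv).Perm
            (aA ++ (pA.filter (fun e => decide (e.1 ≤ t1))).map toAv) :=
          List.Perm.append hap.symm ((hpp.filter _).map toAv).symm
        -- the combined index multiset is preserved by the move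
        have hndmv : ((pB.filter (fun e => decide (t1 < e.1))).map (fun e => e.2.1) ++
            (aB ++ (pB.filter (fun e => decide (e.1 ≤ t1))).map toAv).map (fun e => e.2.1)).Nodup := by
          refine List.Perm.nodup ?_ hnd
          have h1 : (pB.map (fun e => e.2.1)).Perm
              ((pB.filter (fun e => decide (t1 < e.1))).map (fun e => e.2.1) ++
               (pB.filter (fun e => decide (e.1 ≤ t1))).map (fun e => e.2.1)) := by
            rw [← List.map_append]
            exact ((split_perm t1 pB).map _).symm
          have h2 : ((pB.filter (fun e => decide (e.1 ≤ t1))).map toAv).map (fun e => e.2.1)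
              = (pB.filter (fun e => decide (e.1 ≤ t1))).map (fun e => e.2.1) := by
            rw [List.map_map]; rfl
          rw [List.map_append, h2]
          refine (List.Perm.append_right _ h1).trans ?_
          rw [List.append_assoc]
          exact List.Perm.append_left _ List.perm_append_comm
        cases a2 with
        | nil =>
            exfalso
            have h0 : aA ++ (pA.filter (fun e => decide (e.1 ≤ t1))).map toAv = [] :=
              List.perm_nil.mp hm2.symm
            rcases List.append_eq_nil_iff.mp h0 with ⟨hA0, hMv0⟩
            obtain ⟨e, pr, hpe, hle⟩ := hready hA0
            have hmem : e ∈ pA.filter (fun e => decide (e.1 ≤ t1)) := by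
              rw [hpe]; exact List.mem_filter.mpr ⟨List.mem_cons_self, by simpa using hle⟩
            rw [List.map_eq_nil_iff.mp hMv0] at hmem
            exact absurd hmem List.not_mem_nil
        | cons a rest =>
            cases hB2 : aB ++ (pB.filter (fun e => decide (e.1 ≤ t1))).map toAv with
            | nil =>
                exfalso
                rw [hB2] at havperm
                have := (havperm.trans hm2.symm).length_eq
                simp at this
            | cons b bs =>
                rw [hB2] at havperm hndmv
                have havail : (b :: bs).Perm (a :: rest) := havperm.trans hm2.symm
                have hnd2 : ((b :: bs).map (fun e => e.2.1)).Nodup :=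
                  List.Nodup.of_append_right hndmv
                have hsel : minAv b bs = a := sel_head a rest b bs hm3 havail hnd2
                dsimp only
                rw [hsel]
                cases hp2 : p2 with
                | nil =>
                    have hpf : pB.filter (fun e => decide (t1 < e.1)) = [] :=
                      List.perm_nil.mp (hp2 ▸ hfperm).symm
                    rw [hpf]
                    dsimp only
                    exact final_step f ih [] [] a rest b bs C t1 a.1
                      (List.Perm.refl _) (List.Pairwise.nil) hm3 havail (by rw [hpf] at hndmv; exact hndmv)
                | cons e2 p2r =>
                    cases hpf : pB.filter (fun e => decide (t1 < e.1)) with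
                    | nil =>
                        exfalso
                        have hl := (hp2 ▸ hfperm).length_eq
                        rw [hpf] at hl
                        simp at hl
                    | cons c cs =>
                        rw [hpf] at hndmv
                        have hfperm' : (e2 :: p2r).Perm (c :: cs) := by
                          rw [hp2, hpf] at hfperm; exact hfperm
                        have hfsort' : sortedBy keyP (e2 :: p2r) := by
                          rw [hp2] at hfsort; exact hfsort
                        have hmr : minR (c :: cs) = e2.1 :=
                          minR_eq_head e2 p2r (c :: cs) hfsort' hfperm'
                        dsimp only
                        rw [hmr]
                        exact final_step f ih (e2 :: p2r) (c :: cs) a rest b bs C t1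
                          (if t1 + a.1 ≤ e2.1 then a.1 else e2.1 - t1) hfperm' hfsort' hm3 havail hndmv

theorem foldl_pushBy_perm {α : Type} (key : α → Int × Int) (g : Nat → α) (l : List Nat) :
    ∀ acc, (l.foldl (fun h i => pushBy key (g i) h) acc).Perm (acc ++ l.map g) := by
  induction l with
  | nil => intro acc; simp
  | cons x xs ih =>
      intro acc
      refine (ih (pushBy key (g x) acc)).trans ?_
      refine (List.Perm.append_right _ (pushBy_perm key (g x) acc)).trans ?_
      exact List.perm_middle.symm

theorem foldl_pushBy_sorted {α : Type} (key : α → Int × Int) (g : Nat → α) (l : List Nat) :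
    ∀ acc, sortedBy key acc → sortedBy key (l.foldl (fun h i => pushBy key (g i) h) acc) := by
  induction l with
  | nil => intro acc h; exact h
  | cons x xs ih => intro acc h; exact ih _ (pushBy_sorted key (g x) acc h)

theorem srpt_spec_aux (release : List Int) (proc : List Int) (names : Option (List String)) :
    srpt_preemptive release proc names = srpt_preemptive_alt release proc names := by
  unfold srpt_preemptive srpt_preemptive_alt
  refine loop_eq _ _ _ _ _ _ _ ⟨?_, List.Perm.refl _, ?_, List.Pairwise.nil, ?_⟩
  · simpa using foldl_pushBy_perm keyP _ (List.range proc.length) []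
  · exact foldl_pushBy_sorted keyP _ (List.range proc.length) [] List.Pairwise.nil
  · simp only [List.map_nil, List.append_nil, List.map_map]
    refine List.Nodup.map ?_ (List.nodup_range)
    intro x y h
    simpa using h

-- ===== VERDICT (by name: the statement is the Claim_ definition above) =====
theorem srpt_preemptive_spec : Claim_equal_srpt_preemptive := by
  intro release proc names _ _
  unfold Spec_srpt_preemptive
  exact srpt_spec_aux release proc names
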